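-- pv_equiv track=rewrite | github.com/KanavSabharwal/GLoRiPHY | LoRaPHY/decode.py | parity
-- ===== SOURCE A (Python) =====
-- def parity(c, bitmask):
--     parity_val = 0
--     shiftme = c & bitmask
--
--     for _ in range(8):
--         if shiftme & 0x1:
--             parity_val += 1
--         shiftme >>= 1
--
--     return parity_val % 2
-- ===== SOURCE B (Python) =====
-- def parity(c, bitmask):
--     x = (c & bitmask) & 0xFF
--     x ^= x >> 4
--     x ^= x >> 2
--     x ^= x >> 1
--     return x & 1
-- ===== Notes on version B (the rewrite author's own statement) =====
-- stated objective: idiomatic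
-- what changed: Replaces the 8-iteration bit-count loop (count set bits, then mod 2) with the standard branch-free XOR-folding parity trick on the 0xFF-masked byte.
import Mathlib
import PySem

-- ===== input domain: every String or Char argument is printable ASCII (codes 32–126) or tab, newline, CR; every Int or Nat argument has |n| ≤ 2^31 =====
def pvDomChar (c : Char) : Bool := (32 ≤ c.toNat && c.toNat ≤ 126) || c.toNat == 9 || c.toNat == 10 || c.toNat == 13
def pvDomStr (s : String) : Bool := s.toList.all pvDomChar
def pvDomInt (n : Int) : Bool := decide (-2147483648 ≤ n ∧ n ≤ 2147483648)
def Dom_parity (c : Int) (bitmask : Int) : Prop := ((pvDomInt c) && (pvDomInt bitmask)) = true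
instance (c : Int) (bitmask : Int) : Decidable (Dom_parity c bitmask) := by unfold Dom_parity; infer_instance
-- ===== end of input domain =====

-- B replaces A's 8-iteration bit-count loop by the branch-free XOR-folding parity trick on the 0xFF-masked byte (objective: idiomatic).

-- ===== PORT A =====
def parity (c : Int) (bitmask : Int) : Int :=
  -- parity_val = 0; shiftme = c & bitmask; for _ in range(8): if shiftme & 1: parity_val += 1; shiftme >>= 1
  let r := (List.range 8).foldl
    (fun (st : Int × Int) _ =>
      (if PySem.Int.band st.2 1 ≠ 0 then st.1 + 1 else st.1, st.2 >>> (1 : Nat)))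
    (0, PySem.Int.band c bitmask)
  PySem.Int.mod r.1 2

-- ===== PORT B =====
def parity_alt (c : Int) (bitmask : Int) : Int :=
  let x0 := PySem.Int.band (PySem.Int.band c bitmask) 255
  let x1 := PySem.Int.bxor x0 (x0 >>> (4 : Nat))
  let x2 := PySem.Int.bxor x1 (x1 >>> (2 : Nat))
  let x3 := PySem.Int.bxor x2 (x2 >>> (1 : Nat))
  PySem.Int.band x3 1

-- ===== PRECONDITION & SPEC =====
def Spec_parity (c : Int) (bitmask : Int) (out : Int) : Prop := out = parity_alt c bitmask
instance (c : Int) (bitmask : Int) (out : Int) : Decidable (Spec_parity c bitmask out) := by unfold Spec_parity; infer_instance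

-- ===== CLAIM (what is proved, stated in full; the proofs are below) =====
def Claim_equal_parity : Prop := ∀ (c : Int) (bitmask : Int), Dom_parity c bitmask → Spec_parity c bitmask (parity c bitmask)

-- ===== LEMMAS AND PROOFS =====

-- A's loop, as a function of the already-masked value m = c & bitmask
def fA (m : Int) : Int :=
  let r := (List.range 8).foldl
    (fun (st : Int × Int) _ =>
      (if PySem.Int.band st.2 1 ≠ 0 then st.1 + 1 else st.1, st.2 >>> (1 : Nat)))
    (0, m)
  PySem.Int.mod r.1 2

-- B's xor-fold, as a function of the already-masked byte x = (c & bitmask) & 255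
def fB (x : Int) : Int :=
  let x1 := PySem.Int.bxor x (x >>> (4 : Nat))
  let x2 := PySem.Int.bxor x1 (x1 >>> (2 : Nat))
  let x3 := PySem.Int.bxor x2 (x2 >>> (1 : Nat))
  PySem.Int.band x3 1

theorem parity_eq_fA (c bitmask : Int) : parity c bitmask = fA (PySem.Int.band c bitmask) := rfl

theorem parity_alt_eq_fB (c bitmask : Int) :
    parity_alt c bitmask = fB (PySem.Int.band (PySem.Int.band c bitmask) 255) := rfl

theorem pymod_two (a : Int) : PySem.Int.mod a 2 = a % 2 := by
  show a.fmod 2 = a % 2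
  exact Int.fmod_eq_emod_of_nonneg a (by norm_num)

theorem band_one_emod (a : Int) : PySem.Int.band a 1 = a % 2 := by
  rw [PySem.Int.band_one, pymod_two]

theorem band_255_emod (m : Int) : PySem.Int.band m 255 = m % 256 := by
  by_cases h : 0 ≤ m
  · show (if 0 ≤ m then _ else _) = m % 256
    rw [if_pos h, if_pos (by norm_num : (0:Int) ≤ 255)]
    have h1 : m.toNat &&& (255:Int).toNat = m.toNat % 256 := by
      have := Nat.and_two_pow_sub_one_eq_mod m.toNat 8
      norm_num at this
      simpa using this
    rw [h1]
    have h2 : (m.toNat : Int) = m := Int.toNat_of_nonneg h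
    omega
  · show (if 0 ≤ m then _ else _) = m % 256
    rw [if_neg h, if_pos (by norm_num : (0:Int) ≤ 255)]
    have hk : ((-m - 1).toNat : Int) = -m - 1 := Int.toNat_of_nonneg (by omega)
    set k := (-m - 1).toNat with hkdef
    have h1 : (255:Int).toNat &&& k = k % 256 := by
      rw [Nat.and_comm]
      have := Nat.and_two_pow_sub_one_eq_mod k 8
      norm_num at this
      simpa using this
    rw [h1]
    have h3 : (255:Int).toNat = 255 := rfl
    rw [h3]
    omega

-- the two folds agree on every byte value
set_option maxRecDepth 100000 in
theorem key : ∀ r : Fin 256, fA (r : Int) = fB (r : Int) := by decide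

-- A's loop only reads the low 8 bits of m
theorem fA_mod (m : Int) : fA m = fA (m % 256) := by
  unfold fA
  simp only [List.range_succ, List.foldl_append, List.foldl_cons, List.foldl_nil,
    List.range_zero, band_one_emod, Int.shiftRight_eq_div_pow, pymod_two]
  norm_num
  have e0 : m % 2 = m % 256 % 2 := by omega
  have e1 : m / 2 % 2 = m % 256 / 2 % 2 := by omega
  have e2 : m / 2 / 2 % 2 = m % 256 / 2 / 2 % 2 := by omega
  have e3 : m / 2 / 2 / 2 % 2 = m % 256 / 2 / 2 / 2 % 2 := by omega
  have e4 : m / 2 / 2 / 2 / 2 % 2 = m % 256 / 2 / 2 / 2 / 2 % 2 := by omega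
  have e5 : m / 2 / 2 / 2 / 2 / 2 % 2 = m % 256 / 2 / 2 / 2 / 2 / 2 % 2 := by omega
  have e6 : m / 2 / 2 / 2 / 2 / 2 / 2 % 2 = m % 256 / 2 / 2 / 2 / 2 / 2 / 2 % 2 := by omega
  have e7 : m / 2 / 2 / 2 / 2 / 2 / 2 / 2 % 2 = m % 256 / 2 / 2 / 2 / 2 / 2 / 2 / 2 % 2 := by omega
  rw [e0, e1, e2, e3, e4, e5, e6, e7]

theorem main_eq (m : Int) : fA m = fB (m % 256) := by
  have hlo : 0 ≤ m % 256 := Int.emod_nonneg m (by norm_num)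
  have hhi : m % 256 < 256 := Int.emod_lt_of_pos m (by norm_num)
  have hb : (m % 256).toNat < 256 := by omega
  have h := key ⟨(m % 256).toNat, hb⟩
  have hcast : (((⟨(m % 256).toNat, hb⟩ : Fin 256) : ℕ) : Int) = m % 256 := by
    simp [Int.toNat_of_nonneg hlo]
  rw [hcast] at h
  rw [fA_mod, h]

-- ===== VERDICT (by name: the statement is the Claim_ definition above) =====
theorem parity_spec : Claim_equal_parity := by
  intro c bitmask _
  show parity c bitmask = parity_alt c bitmask
  rw [parity_eq_fA, parity_alt_eq_fB, band_255_emod, main_eq]
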